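-- pv_equiv track=rewrite | github.com/dennnoval/kotakode-coding-festival-2.0 | Python/Level_3/subsetTerbesar.py | subsetTerbesar
-- ===== SOURCE A (Python) =====
-- def subsetTerbesar(inputList):
--   # Mempersingkat penamaan variabel dari nama inputList menjadi x
--   x = inputList
--   # Inisialisasi variabel tmp dengan nilai list kosong
--   tmp = []
--   # Inisialisasi variabel l sebagai jumlah elemen dari list x
--   l = len(x)
--   # Inisialisasi variabel s dengan nilai 2 sebagai jumlah lompatan looping
--   s = 2
--   # Looping pertama dengan jangkauan dari 0 hingga nilai l dengan indeks i
--   i = 0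
--   while i < l:
--     # Inisialisasi variabel xx dengan nilai elemen indeks ke-i dari list x
--     xx = x[i]
--     # Looping kedua dengan j sebagai indeks dimulai dari i+2 hingga nilai l dengan s sebagai jumlah lompatan looping nya
--     for j in range(i+s,l,s):
--       # Tambahkan nilai xx dengan nilai elemen ke-j dari list x
--       xx += x[j]
--       # Sisipkan elemen baru xx ke dalam list tmp
--       tmp.append(xx)
--     # Tambahkan indeks looping i dengan nilai 1
--     i += 1
--     # Cek apakah jumlah lompatan looping kurang dari nilai l
--     if s < (l-1) and i == (l-1):
--         # Tambahkan nilai s dengan nilai 1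
--         s += 1
--         # Ubah nilai i menjadi 0
--         i = 0
--   # Simpan nilai maksimal dari set list tmp ke dalam variabel output
--   output = max(set(tmp))
--   return output
-- ===== SOURCE B (Python) =====
-- def subsetTerbesar(inputList):
--     # Faster re-implementation: for each stride s, a single backward DP pass
--     # h[i] = best sum of x[i] + x[i+s] + ... (>= 1 term, consecutive in the stride chain),
--     # so the best >=2-term chain sum starting at i is x[i] + h[i+s].
--     x = inputList
--     l = len(x)
--     best = None
--     for s in range(2, l):
--         h = [0] * l
--         for i in range(l - 1, -1, -1):
--             if i + s < l:
--                 h[i] = x[i] + (h[i + s] if h[i + s] > 0 else 0)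
--             else:
--                 h[i] = x[i]
--         for i in range(l - s):
--             c = x[i] + h[i + s]
--             if best is None or c > best:
--                 best = c
--     return best
-- ===== Notes on version B (the rewrite author's own statement) =====
-- stated objective: faster
-- what changed: A appends every stride-chain partial sum of every start index into one big list and takes max(set(...)); B does, per stride s, one backward DP pass computing the best chain suffix-sum table and folds a running maximum over the best >=2-term chain sum per start, never materialising the partial sums.
-- outside the precondition, e.g. on subsetTerbesar([1, 2]): A raises ValueError, B returns None
import Mathlib
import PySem

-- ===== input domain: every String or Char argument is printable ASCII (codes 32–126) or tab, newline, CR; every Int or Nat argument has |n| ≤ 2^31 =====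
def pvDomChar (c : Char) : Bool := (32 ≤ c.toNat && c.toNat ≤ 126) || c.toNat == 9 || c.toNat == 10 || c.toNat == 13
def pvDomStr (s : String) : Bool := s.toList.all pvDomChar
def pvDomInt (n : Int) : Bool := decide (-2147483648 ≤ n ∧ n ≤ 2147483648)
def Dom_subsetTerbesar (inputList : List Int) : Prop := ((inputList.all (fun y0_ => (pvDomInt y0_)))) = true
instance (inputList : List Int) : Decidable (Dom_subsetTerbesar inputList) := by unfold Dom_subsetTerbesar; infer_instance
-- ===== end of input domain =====

-- B replaces A's "append every stride-chain partial sum, then max(set(...))" by a per-stride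
-- backward DP pass with a running maximum (objective: faster).

-- ===== PORT A =====
-- the while loop of A: state (i, s, tmp); the inner 'for j in range(i+s, l, s)' is a foldl
def subsetTerbesarLoop (x : List Int) (l : Nat) (i s : Nat) (tmp : List Int) : List Int :=
  if hi : i < l then
    let st := (PySem.List.pyRange ((i : Int) + (s : Int)) (l : Int) (s : Int)).foldl
      (fun (p : Int × List Int) (j : Int) =>
        let xx := p.1 + PySem.List.pyGetD x j 0
        (xx, p.2 ++ [xx]))
      (PySem.List.pyGetD x (i : Int) 0, tmp)
    if s < l - 1 ∧ i + 1 = l - 1 then subsetTerbesarLoop x l 0 (s + 1) st.2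
    else subsetTerbesarLoop x l (i + 1) s st.2
  else tmp
termination_by (l - s, l - i)
decreasing_by
  · rename_i hcond
    exact Prod.Lex.left _ _ (Nat.sub_lt_sub_left
      (Nat.lt_of_lt_of_le hcond.1 (Nat.sub_le l 1)) (Nat.lt_succ_self s))
  · exact Prod.Lex.right _ (Nat.sub_lt_sub_left hi (Nat.lt_succ_self i))

def subsetTerbesar (inputList : List Int) : Int :=
  let x := inputList
  let l := x.length
  let tmp := subsetTerbesarLoop x l 0 2 []
  -- max(set(tmp)): Python raises ValueError when tmp is empty (len < 3); excluded by Pre_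
  (PySem.List.max? (PySem.Set.ofList tmp) (fun y => y)).getD 0

-- ===== PORT B =====
-- h = [0]*l; for i in range(l-1,-1,-1): backward DP table of best ≥1-term chain sums
def subsetTerbesarTable (x : List Int) (l : Nat) (s : Int) : List Int :=
  (PySem.List.pyRange ((l : Int) - 1) (-1) (-1)).foldl
    (fun h i =>
      if i + s < (l : Int) then
        let t := PySem.List.pyGetD h (i + s) 0
        PySem.List.pySetD h i (PySem.List.pyGetD x i 0 + (if t > 0 then t else 0))
      else
        PySem.List.pySetD h i (PySem.List.pyGetD x i 0))
    (List.replicate l 0)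

-- for i in range(l - s): c = x[i] + h[i+s]; if best is None or c > best: best = c
def subsetTerbesarInner (x h : List Int) (l : Nat) (s : Int) (best : Option Int) : Option Int :=
  (PySem.List.pyRange 0 ((l : Int) - s) 1).foldl
    (fun b i =>
      let c := PySem.List.pyGetD x i 0 + PySem.List.pyGetD h (i + s) 0
      match b with
      | none => some c
      | some bv => if c > bv then some c else some bv)
    best

def subsetTerbesar_alt (inputList : List Int) : Int :=
  let x := inputList
  let l := x.length
  let best := (PySem.List.pyRange 2 (l : Int) 1).foldl
    (fun b s => subsetTerbesarInner x (subsetTerbesarTable x l s) l s b) none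
  -- best is None only when l < 3, which Pre_ excludes
  best.getD 0

-- ===== PRECONDITION & SPEC =====
-- Pre_ excludes lists of fewer than 3 elements: there A's tmp stays empty and max(set([])) raises ValueError
def Pre_subsetTerbesar (inputList : List Int) : Prop := 3 ≤ inputList.length
instance (inputList : List Int) : Decidable (Pre_subsetTerbesar inputList) := by
  unfold Pre_subsetTerbesar; infer_instance

def pvWitness_subsetTerbesar : List Int := [1, 2, 3]

def Spec_subsetTerbesar (inputList : List Int) (out : Int) : Prop := out = subsetTerbesar_alt inputList
instance (inputList : List Int) (out : Int) : Decidable (Spec_subsetTerbesar inputList out) := by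
  unfold Spec_subsetTerbesar; infer_instance

-- ===== CLAIM (what is proved, stated in full; the proofs are below) =====
def Claim_equal_subsetTerbesar : Prop := ∀ (inputList : List Int), Dom_subsetTerbesar inputList →
  Pre_subsetTerbesar inputList → Spec_subsetTerbesar inputList (subsetTerbesar inputList)

-- ===== LEMMAS AND PROOFS =====

-- list of partial sums acc + x[j], acc + x[j] + x[j+s], … (j stepping by s while < l)
def psList (x : List Int) (l s : Nat) (acc : Int) (j : Nat) : List Int :=
  if _h : j < l ∧ 0 < s then
    (acc + x.getD j 0) :: psList x l s (acc + x.getD j 0) (j + s)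
  else []
termination_by l - j
decreasing_by omega

-- final accumulator of the same walk
def psLast (x : List Int) (l s : Nat) (acc : Int) (j : Nat) : Int :=
  if _h : j < l ∧ 0 < s then psLast x l s (acc + x.getD j 0) (j + s) else acc
termination_by l - j
decreasing_by omega

-- best (≥1-term) chain sum starting at j with stride s
def hRec (x : List Int) (l s : Nat) (j : Nat) : Int :=
  if _h : j + s < l ∧ 0 < s then x.getD j 0 + max 0 (hRec x l s (j + s)) else x.getD j 0
termination_by l - j
decreasing_by omega

def candVal (x : List Int) (l s i : Nat) : Int := x.getD i 0 + hRec x l s (i + s)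

def blockL (x : List Int) (l s i : Nat) : List Int := psList x l s (x.getD i 0) (i + s)

def passFrom (x : List Int) (l s i : Nat) : List Int :=
  ((List.range (l - i)).map (i + ·)).flatMap (fun i' => blockL x l s i')

def allPasses (x : List Int) (l s : Nat) : List Int :=
  ((List.range (l - 1 - s)).map (fun k => s + 1 + k)).flatMap (fun s' => passFrom x l s' 0)

def fullL (x : List Int) (l : Nat) : List Int :=
  ((List.range (l - 2)).map (fun k => 2 + k)).flatMap (fun s => passFrom x l s 0)

def allCands (x : List Int) (l : Nat) : List Int :=
  ((List.range (l - 2)).map (fun k => 2 + k)).flatMap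
    (fun s => (List.range (l - s)).map (fun i => candVal x l s i))

def runMax (acc : Option Int) (cs : List Int) : Option Int :=
  cs.foldl (fun b c => match b with | none => some c | some bv => if c > bv then some c else some bv) acc

-- the step function of B's backward table pass, at a fixed stride
def tStep (x : List Int) (l : Nat) (sN : Nat) : List Int → Int → List Int :=
  fun h i =>
    if i + (sN : Int) < (l : Int) then
      let t := PySem.List.pyGetD h (i + (sN : Int)) 0
      PySem.List.pySetD h i (PySem.List.pyGetD x i 0 + (if t > 0 then t else 0))
    else
      PySem.List.pySetD h i (PySem.List.pyGetD x i 0)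

-- range with positive step: cons form
theorem pyRange_pos_cons (a b s : Int) (hs : 0 < s) (hab : a < b) :
    PySem.List.pyRange a b s = a :: PySem.List.pyRange (a + s) b s := by
  rw [PySem.List.pyRange_of_pos a b hs, PySem.List.pyRange_of_pos (a + s) b hs]
  have hq0 : 0 ≤ (b - a - 1) / s := Int.ediv_nonneg (by omega) (by omega)
  have key : (b - a + s - 1) / s = (b - a - 1) / s + 1 := by
    have h1 : b - a + s - 1 = (b - a - 1) + 1 * s := by ring
    rw [h1, Int.add_mul_ediv_right _ _ (by omega : s ≠ 0)]
  have hN' : (if a + s < b then ((b - (a + s) + s - 1) / s).toNat else 0)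
      = ((b - a - 1) / s).toNat := by
    split
    · have hnum : b - (a + s) + s - 1 = b - a - 1 := by ring
      rw [hnum]
    · have h0 : (b - a - 1) / s = 0 := Int.ediv_eq_zero_of_lt (by omega) (by omega)
      simp [h0]
  rw [if_pos hab, key, hN']
  have h2 : ((b - a - 1) / s + 1).toNat = ((b - a - 1) / s).toNat + 1 := by omega
  rw [h2, List.range_succ_eq_map]
  simp only [List.map_cons, List.map_map, Nat.cast_zero, mul_zero, add_zero]
  congr 1
  apply List.map_congr_left
  intro k _
  simp only [Function.comp_apply]
  push_cast
  ring

theorem pyRange_pos_nil (a b s : Int) (hs : 0 < s) (hab : b ≤ a) :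
    PySem.List.pyRange a b s = [] := by
  rw [PySem.List.pyRange_of_pos a b hs, if_neg (by omega)]
  simp

theorem psList_nil (x : List Int) (l s : Nat) (acc : Int) (j : Nat) (h : l ≤ j) :
    psList x l s acc j = [] := by
  rw [psList]; simp; omega

theorem psList_le_max (x : List Int) (l s : Nat) (hs : 0 < s) :
    ∀ (n j : Nat), l - j ≤ n → ∀ (acc v : Int),
      v ∈ psList x l s acc j → v ≤ acc + hRec x l s j := by
  intro n
  induction n with
  | zero =>
    intro j hj acc v hv
    rw [psList_nil x l s acc j (by omega)] at hv
    simp at hv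
  | succ n ih =>
    intro j hj acc v hv
    rw [psList] at hv
    by_cases hjl : j < l ∧ 0 < s
    · rw [dif_pos hjl] at hv
      rw [hRec]
      rcases List.mem_cons.mp hv with hv | hv
      · subst hv
        by_cases hc : j + s < l ∧ 0 < s
        · rw [dif_pos hc]
          have h1 := le_max_left (0 : Int) (hRec x l s (j + s))
          linarith
        · rw [dif_neg hc]
      · by_cases hc : j + s < l ∧ 0 < s
        · rw [dif_pos hc]
          have h1 := ih (j + s) (by omega) (acc + x.getD j 0) v hv
          have h2 := le_max_right (0 : Int) (hRec x l s (j + s))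
          linarith
        · have hls : l ≤ j + s := by omega
          rw [psList_nil x l s _ _ hls] at hv
          simp at hv
    · rw [dif_neg hjl] at hv
      simp at hv

theorem psList_max_mem (x : List Int) (l s : Nat) (hs : 0 < s) :
    ∀ (n j : Nat), l - j ≤ n → j < l → ∀ (acc : Int),
      acc + hRec x l s j ∈ psList x l s acc j := by
  intro n
  induction n with
  | zero => intro j hj hjl acc; exact absurd hjl (by omega)
  | succ n ih =>
    intro j hj hjl acc
    rw [psList, dif_pos ⟨hjl, hs⟩, hRec]
    by_cases hc : j + s < l ∧ 0 < s
    · rw [dif_pos hc]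
      by_cases hpos : 0 < hRec x l s (j + s)
      · rw [max_eq_right hpos.le]
        have h1 := ih (j + s) (by omega) hc.1 (acc + x.getD j 0)
        have h2 : acc + (x.getD j 0 + hRec x l s (j + s))
            = acc + x.getD j 0 + hRec x l s (j + s) := by ring
        rw [h2]
        exact List.mem_cons_of_mem _ h1
      · rw [max_eq_left (by omega)]
        have h2 : acc + (x.getD j 0 + 0) = acc + x.getD j 0 := by ring
        rw [h2]
        exact List.mem_cons_self
    · rw [dif_neg hc]
      exact List.mem_cons_self

-- A's inner for-loop
theorem innerA_eq (x : List Int) (l s : Nat) (hs : 0 < s) :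
    ∀ (n a : Nat), l - a ≤ n → ∀ (xx : Int) (tmp : List Int),
    (PySem.List.pyRange (a : Int) (l : Int) (s : Int)).foldl
      (fun (p : Int × List Int) (j : Int) =>
        let xx := p.1 + PySem.List.pyGetD x j 0
        (xx, p.2 ++ [xx])) (xx, tmp)
    = (psLast x l s xx a, tmp ++ psList x l s xx a) := by
  intro n
  induction n with
  | zero =>
    intro a ha xx tmp
    have hla : l ≤ a := by omega
    rw [pyRange_pos_nil _ _ _ (by exact_mod_cast hs) (by exact_mod_cast hla)]
    rw [psList_nil x l s xx a hla, psLast, dif_neg (by omega)]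
    simp
  | succ n ih =>
    intro a ha xx tmp
    by_cases hal : a < l
    · rw [pyRange_pos_cons _ _ _ (by exact_mod_cast hs) (by exact_mod_cast hal), List.foldl_cons]
      simp only [PySem.List.pyGetD_natCast]
      have hcast : ((a : Int) + (s : Int)) = ((a + s : Nat) : Int) := by push_cast; ring
      rw [hcast, ih (a + s) (by omega)]
      conv_rhs => rw [psLast, psList]
      rw [dif_pos ⟨hal, hs⟩, dif_pos ⟨hal, hs⟩]
      simp
    · have hla : l ≤ a := by omega
      rw [pyRange_pos_nil _ _ _ (by exact_mod_cast hs) (by exact_mod_cast hla)]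
      rw [psList_nil x l s xx a hla, psLast, dif_neg (by omega)]
      simp

theorem passFrom_peel (x : List Int) (l s i : Nat) (h : i < l) :
    passFrom x l s i = blockL x l s i ++ passFrom x l s (i + 1) := by
  unfold passFrom
  have h1 : l - i = (l - (i + 1)) + 1 := by omega
  rw [h1, List.range_succ_eq_map, List.map_cons, List.flatMap_cons, List.map_map]
  have hmap : List.map ((fun x => i + x) ∘ Nat.succ) (List.range (l - (i + 1)))
      = List.map (fun x => i + 1 + x) (List.range (l - (i + 1))) := by
    apply List.map_congr_left
    intro k _
    simp only [Function.comp_apply]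
    omega
  rw [hmap]
  norm_num

theorem passFrom_nil (x : List Int) (l s i : Nat) (h : l ≤ i) : passFrom x l s i = [] := by
  unfold passFrom
  have h1 : l - i = 0 := by omega
  simp [h1]

theorem passFrom_zero (x : List Int) (l s : Nat) :
    passFrom x l s 0 = (List.range l).flatMap (fun i => blockL x l s i) := by
  unfold passFrom
  simp

theorem allPasses_nil (x : List Int) (l s : Nat) (h : l - 1 ≤ s) : allPasses x l s = [] := by
  unfold allPasses
  have h1 : l - 1 - s = 0 := by omega
  simp [h1]

theorem allPasses_peel (x : List Int) (l s : Nat) (h : s < l - 1) :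
    allPasses x l s = passFrom x l (s + 1) 0 ++ allPasses x l (s + 1) := by
  unfold allPasses
  have h1 : l - 1 - s = (l - 1 - (s + 1)) + 1 := by omega
  rw [h1, List.range_succ_eq_map, List.map_cons, List.flatMap_cons, List.map_map]
  have hmap : List.map ((fun k => s + 1 + k) ∘ Nat.succ) (List.range (l - 1 - (s + 1)))
      = List.map (fun k => s + 1 + 1 + k) (List.range (l - 1 - (s + 1))) := by
    apply List.map_congr_left
    intro k _
    simp only [Function.comp_apply]
    omega
  rw [hmap]

theorem fullL_eq (x : List Int) (l : Nat) (h : 3 ≤ l) :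
    fullL x l = passFrom x l 2 0 ++ allPasses x l 2 := by
  unfold fullL allPasses
  have h1 : l - 2 = (l - 1 - 2) + 1 := by omega
  rw [h1, List.range_succ_eq_map, List.map_cons, List.flatMap_cons, List.map_map]
  have hmap : List.map ((fun k => 2 + k) ∘ Nat.succ) (List.range (l - 1 - 2))
      = List.map (fun k => 2 + 1 + k) (List.range (l - 1 - 2)) := by
    apply List.map_congr_left
    intro k _
    simp only [Function.comp_apply]
    omega
  rw [hmap]

theorem blockL_hi (x : List Int) (l s i : Nat) (h : l ≤ i + s) : blockL x l s i = [] := by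
  unfold blockL
  exact psList_nil x l s _ _ h

theorem loopA_unfold (x : List Int) (l i s : Nat) (tmp : List Int) (hi : i < l) (hs : 0 < s) :
    subsetTerbesarLoop x l i s tmp =
      if s < l - 1 ∧ i + 1 = l - 1
      then subsetTerbesarLoop x l 0 (s + 1) (tmp ++ blockL x l s i)
      else subsetTerbesarLoop x l (i + 1) s (tmp ++ blockL x l s i) := by
  conv_lhs => rw [subsetTerbesarLoop]
  rw [dif_pos hi]
  have hcast : ((i : Int) + (s : Int)) = ((i + s : Nat) : Int) := by push_cast; ring
  rw [hcast, innerA_eq x l s hs (l - (i + s)) (i + s) le_rfl, PySem.List.pyGetD_natCast]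
  rfl

-- A's while loop, closed form
theorem loopA_eq (x : List Int) (l : Nat) :
    ∀ (n i s : Nat) (tmp : List Int), (l - s) * (l + 1) + (l - i) < n → 0 < s → i ≤ l →
    subsetTerbesarLoop x l i s tmp
      = tmp ++ passFrom x l s i ++ (if s < l - 1 ∧ i < l - 1 then allPasses x l s else []) := by
  intro n
  induction n with
  | zero => intro i s tmp h; omega
  | succ n ih =>
    intro i s tmp hn hs hil
    by_cases hi : i < l
    · rw [loopA_unfold x l i s tmp hi hs]
      by_cases hcond : s < l - 1 ∧ i + 1 = l - 1
      · rw [if_pos hcond]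
        obtain ⟨hsl, hil1⟩ := hcond
        have hmul : (l - s) * (l + 1) = (l - s - 1) * (l + 1) + (l + 1) := by
          have h' : l - s - 1 + 1 = l - s := by omega
          calc (l - s) * (l + 1) = (l - s - 1 + 1) * (l + 1) := by rw [h']
            _ = (l - s - 1) * (l + 1) + (l + 1) := by ring
        have hA : l - (s + 1) = l - s - 1 := by omega
        rw [ih 0 (s + 1) _ (by rw [hA]; omega) (by omega) (by omega)]
        rw [if_pos (show s < l - 1 ∧ i < l - 1 by omega)]
        rw [allPasses_peel x l s hsl]
        rw [passFrom_peel x l s i (by omega),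
            passFrom_peel x l s (i + 1) (by omega),
            blockL_hi x l s (i + 1) (by omega),
            passFrom_nil x l s (i + 2) (by omega)]
        by_cases hs1 : s + 1 < l - 1
        · rw [if_pos (show s + 1 < l - 1 ∧ 0 < l - 1 by omega)]
          simp [List.append_assoc]
        · rw [if_neg (by omega), allPasses_nil x l (s + 1) (by omega)]
          simp [List.append_assoc]
      · rw [if_neg hcond]
        rw [ih (i + 1) s _ (by omega) hs (by omega)]
        rw [passFrom_peel x l s i hi]
        have hiff : (s < l - 1 ∧ i + 1 < l - 1) ↔ (s < l - 1 ∧ i < l - 1) := by omega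
        simp only [hiff]
        simp [List.append_assoc]
    · rw [subsetTerbesarLoop, dif_neg hi]
      have hieq : i = l := by omega
      rw [passFrom_nil x l s i (by omega), if_neg (by omega)]
      simp

-- B's table equals the fold of tStep (definitional)
theorem table_eq_fold (x : List Int) (l sN : Nat) :
    subsetTerbesarTable x l (sN : Int)
      = (PySem.List.pyRange ((l : Int) - 1) (-1) (-1)).foldl (tStep x l sN) (List.replicate l 0) := rfl

theorem pySetD_set (h : List Int) (aN : Nat) (v : Int) (hlt : aN < h.length) :
    PySem.List.pySetD h (aN : Int) v = h.set aN v := by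
  unfold PySem.List.pySetD
  rw [PySem.List.pySet?_natCast h aN v hlt]
  rfl

theorem tableAux (x : List Int) (l sN : Nat) (hs : 0 < sN) :
    ∀ (n : Nat) (a : Int), -1 ≤ a → a < (l : Int) → (a + 1).toNat ≤ n →
    ∀ (h : List Int), h.length = l →
    (∀ j : Nat, a < (j : Int) → j < l → PySem.List.pyGetD h (j : Int) 0 = hRec x l sN j) →
    ((PySem.List.pyRange a (-1) (-1)).foldl (tStep x l sN) h).length = l ∧
    (∀ j : Nat, j < l →
      PySem.List.pyGetD ((PySem.List.pyRange a (-1) (-1)).foldl (tStep x l sN) h) (j : Int) 0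
        = hRec x l sN j) := by
  intro n
  induction n with
  | zero =>
    intro a h1 h2 h3 h hlen hinv
    rw [PySem.List.pyRange_neg_one_eq_nil (by omega)]
    exact ⟨hlen, fun j hj => hinv j (by omega) hj⟩
  | succ n ih =>
    intro a h1 h2 h3 h hlen hinv
    by_cases ha : a ≤ -1
    · rw [PySem.List.pyRange_neg_one_eq_nil (by omega)]
      exact ⟨hlen, fun j hj => hinv j (by omega) hj⟩
    · have ha0 : 0 ≤ a := by omega
      rw [PySem.List.pyRange_neg_one_cons (show (-1 : Int) < a by omega), List.foldl_cons]
      have haa : ((a.toNat : Nat) : Int) = a := Int.toNat_of_nonneg ha0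
      have haNl : a.toNat < l := by omega
      -- the one-step update writes hRec at a.toNat
      have hval : tStep x l sN h a = PySem.List.pySetD h a (hRec x l sN a.toNat) := by
        unfold tStep
        have hx : PySem.List.pyGetD x a 0 = x.getD a.toNat 0 := by
          conv_lhs => rw [← haa]
          exact PySem.List.pyGetD_natCast x a.toNat 0
        by_cases hbr : a + (sN : Int) < (l : Int)
        · rw [if_pos hbr]
          have hcast : a + (sN : Int) = ((a.toNat + sN : Nat) : Int) := by omega
          have ht : PySem.List.pyGetD h (a + (sN : Int)) 0 = hRec x l sN (a.toNat + sN) := by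
            rw [hcast]
            exact hinv (a.toNat + sN) (by omega) (by omega)
          have hrec : hRec x l sN a.toNat
              = x.getD a.toNat 0 + max 0 (hRec x l sN (a.toNat + sN)) := by
            rw [hRec, dif_pos ⟨by omega, hs⟩]
          simp only [ht, hx, hrec]
          congr 2
          by_cases hpos : hRec x l sN (a.toNat + sN) > 0
          · rw [if_pos hpos, max_eq_right (by omega)]
          · rw [if_neg hpos, max_eq_left (by omega)]
        · rw [if_neg hbr]
          have hrec : hRec x l sN a.toNat = x.getD a.toNat 0 := by
            rw [hRec, dif_neg (by omega)]
          rw [hx, hrec]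
      rw [hval]
      have hlen2 : (PySem.List.pySetD h a (hRec x l sN a.toNat)).length = l := by
        rw [← haa, pySetD_set h a.toNat _ (by omega), List.length_set, hlen]
      have hinv2 : ∀ j : Nat, a - 1 < (j : Int) → j < l →
          PySem.List.pyGetD (PySem.List.pySetD h a (hRec x l sN a.toNat)) (j : Int) 0
            = hRec x l sN j := by
        intro j hj1 hj2
        rw [← haa, PySem.List.pyGetD_pySetD_natCast h a.toNat j _ _ (by omega)]
        by_cases hje : j = a.toNat
        · rw [if_pos hje, hje]
          congr 1
        · rw [if_neg hje]
          exact hinv j (by omega) hj2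
      exact ih (a - 1) (by omega) (by omega) (by omega) _ hlen2 hinv2

theorem table_eq (x : List Int) (l sN : Nat) (hs : 0 < sN) :
    ∀ j : Nat, j < l →
      PySem.List.pyGetD (subsetTerbesarTable x l (sN : Int)) (j : Int) 0 = hRec x l sN j := by
  intro j hj
  rw [table_eq_fold]
  exact (tableAux x l sN hs l ((l : Int) - 1) (by omega) (by omega) (by omega)
    (List.replicate l 0) (by simp)
    (fun j hj1 hj2 => False.elim (by omega))).2 j hj

theorem runMax_cons (acc : Option Int) (c : Int) (cs : List Int) :
    runMax acc (c :: cs)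
      = runMax (match acc with | none => some c | some bv => if c > bv then some c else some bv) cs := rfl

theorem runMax_some_ne_none : ∀ (cs : List Int) (b : Int), runMax (some b) cs ≠ none := by
  intro cs
  induction cs with
  | nil => intro b h; simp [runMax] at h
  | cons c cs ih =>
    intro b
    rw [runMax_cons]
    by_cases hcb : c > b
    · simp only [if_pos hcb]; exact ih c
    · simp only [if_neg hcb]; exact ih b

theorem runMax_ne_none (cs : List Int) (h : cs ≠ []) (acc : Option Int) :
    runMax acc cs ≠ none := by
  cases cs with
  | nil => exact absurd rfl h
  | cons c cs =>
    rw [runMax_cons]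
    cases acc with
    | none => exact runMax_some_ne_none cs c
    | some bv =>
      by_cases hcb : c > bv
      · simp only [if_pos hcb]; exact runMax_some_ne_none cs c
      · simp only [if_neg hcb]; exact runMax_some_ne_none cs bv

theorem runMax_spec (cs : List Int) : ∀ (acc : Option Int) (m : Int), runMax acc cs = some m →
    (m ∈ cs ∨ acc = some m) ∧ (∀ c ∈ cs, c ≤ m) ∧ (∀ b, acc = some b → b ≤ m) := by
  induction cs with
  | nil =>
    intro acc m h
    simp only [runMax, List.foldl_nil] at h
    refine ⟨Or.inr h, by simp, fun b hb => ?_⟩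
    rw [h] at hb
    injection hb with hb
    omega
  | cons c cs ih =>
    intro acc m h
    rw [runMax_cons] at h
    cases acc with
    | none =>
      obtain ⟨h1, h2, h3⟩ := ih (some c) m h
      refine ⟨?_, ?_, ?_⟩
      · rcases h1 with h1 | h1
        · exact Or.inl (List.mem_cons_of_mem _ h1)
        · injection h1 with h1
          exact Or.inl (h1 ▸ List.mem_cons_self)
      · intro d hd
        rcases List.mem_cons.mp hd with rfl | hd
        · exact h3 d rfl
        · exact h2 d hd
      · intro b hb; simp at hb
    | some bv =>
      by_cases hcb : c > bv
      · simp only [if_pos hcb] at h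
        obtain ⟨h1, h2, h3⟩ := ih (some c) m h
        refine ⟨?_, ?_, ?_⟩
        · rcases h1 with h1 | h1
          · exact Or.inl (List.mem_cons_of_mem _ h1)
          · injection h1 with h1
            exact Or.inl (h1 ▸ List.mem_cons_self)
        · intro d hd
          rcases List.mem_cons.mp hd with rfl | hd
          · exact h3 d rfl
          · exact h2 d hd
        · intro b hb
          injection hb with hb
          have h4 := h3 c rfl
          omega
      · simp only [if_neg hcb] at h
        obtain ⟨h1, h2, h3⟩ := ih (some bv) m h
        refine ⟨?_, ?_, ?_⟩
        · rcases h1 with h1 | h1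
          · exact Or.inl (List.mem_cons_of_mem _ h1)
          · exact Or.inr h1
        · intro d hd
          rcases List.mem_cons.mp hd with rfl | hd
          · have := h3 bv rfl
            omega
          · exact h2 d hd
        · intro b hb
          injection hb with hb
          have h4 := h3 bv rfl
          omega

theorem runMax_append (acc : Option Int) (cs ds : List Int) :
    runMax acc (cs ++ ds) = runMax (runMax acc cs) ds := by
  unfold runMax
  rw [List.foldl_append]

theorem fold_runMax {α : Type} (g : α → List Int) :
    ∀ (ss : List α) (acc : Option Int),
    ss.foldl (fun b s => runMax b (g s)) acc = runMax acc (ss.flatMap g) := by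
  intro ss
  induction ss with
  | nil => intro acc; simp [runMax]
  | cons s ss ih =>
    intro acc
    simp only [List.foldl_cons, List.flatMap_cons, runMax_append]
    rw [ih]

-- B's inner loop at stride sN, over a correct table
theorem bInner_eq (x : List Int) (l sN : Nat) (hs : 0 < sN) (hsl : sN ≤ l) (best : Option Int) :
    subsetTerbesarInner x (subsetTerbesarTable x l (sN : Int)) l (sN : Int) best
      = runMax best ((List.range (l - sN)).map (fun i => candVal x l sN i)) := by
  unfold subsetTerbesarInner runMax
  have hc : (l : Int) - (sN : Int) = ((l - sN : Nat) : Int) := by omega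
  rw [hc, PySem.List.pyRange_zero_natCast, List.foldl_map, List.foldl_map]
  apply PySem.List.foldl_congr_mem
  intro acc k hk
  have hklt : k < l - sN := List.mem_range.mp hk
  have e2 : ((k : Int) + (sN : Int)) = ((k + sN : Nat) : Int) := by push_cast; ring
  have e3 : PySem.List.pyGetD (subsetTerbesarTable x l (sN : Int)) ((k + sN : Nat) : Int) 0
      = hRec x l sN (k + sN) := table_eq x l sN hs (k + sN) (by omega)
  cases acc with
  | none =>
    simp only [e2, e3]
    rw [PySem.List.pyGetD_natCast]
    rfl
  | some bv =>
    simp only [e2, e3]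
    rw [PySem.List.pyGetD_natCast]
    rfl

theorem altB_eq (x : List Int) :
    subsetTerbesar_alt x = (runMax none (allCands x x.length)).getD 0 := by
  have hmain : (PySem.List.pyRange 2 (x.length : Int) 1).foldl
      (fun b s => subsetTerbesarInner x (subsetTerbesarTable x x.length s) x.length s b) none
      = runMax none (allCands x x.length) := by
    rw [PySem.List.pyRange_one 2 (x.length : Int)]
    have h2 : ((x.length : Int) - 2).toNat = x.length - 2 := by omega
    rw [h2, List.foldl_map]
    have hcong := PySem.List.foldl_congr_mem (List.range (x.length - 2))
      (fun (b : Option Int) (k : Nat) => subsetTerbesarInner x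
        (subsetTerbesarTable x x.length ((2 : Int) + (k : Int))) x.length ((2 : Int) + (k : Int)) b)
      (fun (b : Option Int) (k : Nat) =>
        runMax b ((List.range (x.length - (2 + k))).map (fun i => candVal x x.length (2 + k) i)))
      none ?_
    · rw [hcong, fold_runMax]
      unfold allCands
      rw [List.flatMap_map]
    · intro acc k hk
      have hk' : k < x.length - 2 := List.mem_range.mp hk
      have e : ((2 : Int) + (k : Int)) = (((2 + k : Nat)) : Int) := by push_cast; ring
      show subsetTerbesarInner x (subsetTerbesarTable x x.length ((2 : Int) + (k : Int)))
          x.length ((2 : Int) + (k : Int)) acc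
        = runMax acc ((List.range (x.length - (2 + k))).map (fun i => candVal x x.length (2 + k) i))
      rw [e, bInner_eq x x.length (2 + k) (by omega) (by omega) acc]
  exact congrArg (fun o => o.getD 0) hmain

theorem mem_fullL (x : List Int) (l : Nat) (v : Int) :
    v ∈ fullL x l ↔ ∃ s, 2 ≤ s ∧ s < l ∧ ∃ i, i < l ∧ v ∈ blockL x l s i := by
  unfold fullL
  simp only [passFrom_zero, List.mem_flatMap, List.mem_map, List.mem_range]
  constructor
  · rintro ⟨s, ⟨k, hk, rfl⟩, i, hi, hv⟩
    exact ⟨2 + k, by omega, by omega, i, hi, hv⟩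
  · rintro ⟨s, hs2, hsl, i, hil, hv⟩
    exact ⟨s, ⟨s - 2, by omega, by omega⟩, i, hil, hv⟩

theorem mem_allCands (x : List Int) (l : Nat) (v : Int) :
    v ∈ allCands x l ↔ ∃ s, 2 ≤ s ∧ s < l ∧ ∃ i, i < l - s ∧ v = candVal x l s i := by
  unfold allCands
  simp only [List.mem_flatMap, List.mem_map, List.mem_range]
  constructor
  · rintro ⟨s, ⟨k, hk, rfl⟩, i, hi, rfl⟩
    exact ⟨2 + k, by omega, by omega, i, hi, rfl⟩
  · rintro ⟨s, hs2, hsl, i, hil, rfl⟩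
    exact ⟨s, ⟨s - 2, by omega, by omega⟩, i, hil, rfl⟩

-- ===== VERDICT (by name: the statement is the Claim_ definition above) =====
theorem subsetTerbesar_spec : Claim_equal_subsetTerbesar := by
  intro x _hdom hpre
  have hl3 : 3 ≤ x.length := hpre
  show subsetTerbesar x = subsetTerbesar_alt x
  have hloop : subsetTerbesarLoop x x.length 0 2 [] = fullL x x.length := by
    rw [loopA_eq x x.length ((x.length - 2) * (x.length + 1) + x.length + 1) 0 2 []
      (by omega) (by omega) (by omega)]
    rw [fullL_eq x x.length hl3]
    by_cases h4 : 2 < x.length - 1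
    · rw [if_pos ⟨h4, by omega⟩]; simp
    · rw [if_neg (by omega), allPasses_nil x x.length 2 (by omega)]; simp
  have hA : subsetTerbesar x
      = (PySem.List.max? (PySem.Set.ofList (fullL x x.length)) (fun y => y)).getD 0 := by
    show (PySem.List.max? (PySem.Set.ofList (subsetTerbesarLoop x x.length 0 2 []))
      (fun y => y)).getD 0 = _
    rw [hloop]
  rw [hA, altB_eq x]
  -- B's running maximum
  have hc0 : candVal x x.length 2 0 ∈ allCands x x.length :=
    (mem_allCands x x.length _).mpr ⟨2, le_rfl, by omega, 0, by omega, rfl⟩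
  have hne : allCands x x.length ≠ [] := List.ne_nil_of_mem hc0
  obtain ⟨mB, hmB⟩ : ∃ m, runMax none (allCands x x.length) = some m := by
    cases hcase : runMax none (allCands x x.length) with
    | none => exact absurd hcase (runMax_ne_none _ hne none)
    | some m => exact ⟨m, rfl⟩
  have hspecB := runMax_spec (allCands x x.length) none mB hmB
  have hmBmem : mB ∈ allCands x x.length := by
    rcases hspecB.1 with h | h
    · exact h
    · simp at h
  obtain ⟨sB, hsB2, hsBl, iB, hiB, hmBeq⟩ := (mem_allCands x x.length mB).mp hmBmem
  have hmBfull : mB ∈ fullL x x.length := by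
    apply (mem_fullL x x.length mB).mpr
    refine ⟨sB, hsB2, hsBl, iB, by omega, ?_⟩
    rw [hmBeq]
    exact psList_max_mem x x.length sB (by omega) (x.length - (iB + sB)) (iB + sB) le_rfl
      (by omega) (x.getD iB 0)
  have hmBset : mB ∈ PySem.Set.ofList (fullL x x.length) :=
    (PySem.Set.mem_ofList _ _).mpr hmBfull
  -- A's max over the same value set
  obtain ⟨mA, hmA⟩ : ∃ m, PySem.List.max? (PySem.Set.ofList (fullL x x.length)) (fun y => y)
      = some m := by
    cases hcase : PySem.List.max? (PySem.Set.ofList (fullL x x.length)) (fun y => y) with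
    | none =>
      rw [PySem.List.max?_eq_none_iff] at hcase
      rw [hcase] at hmBset
      simp at hmBset
    | some m => exact ⟨m, rfl⟩
  have hmAfull : mA ∈ fullL x x.length :=
    (PySem.Set.mem_ofList _ _).mp (PySem.List.max?_mem hmA)
  obtain ⟨sA, hsA2, hsAl, iA, hiA, hvA⟩ := (mem_fullL x x.length mA).mp hmAfull
  have hblt : iA + sA < x.length := by
    by_contra hcon
    rw [blockL_hi x x.length sA iA (by omega)] at hvA
    simp at hvA
  have h1 : mA ≤ candVal x x.length sA iA :=
    psList_le_max x x.length sA (by omega) (x.length - (iA + sA)) (iA + sA) le_rfl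
      (x.getD iA 0) mA hvA
  have h2 : candVal x x.length sA iA ≤ mB :=
    hspecB.2.1 _ ((mem_allCands x x.length _).mpr ⟨sA, hsA2, hsAl, iA, by omega, rfl⟩)
  have h3 : mB ≤ mA := PySem.List.max?_isMax hmA mB hmBset
  have hAB : mA = mB := le_antisymm (by omega) h3
  rw [hmA, hmB, hAB]
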